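-- pv_equiv track=rewrite | github.com/emmafradlin/punctle | extract_sentences.py | check_setence
-- ===== SOURCE A (Python) =====
-- allowed_punctuation = {',', '.', '?', '!', ';', ':'}
--
-- def check_setence(sentence):
--     if len(sentence) < 20:
--         return (0, 0)
--     if sentence[0].islower():
--         return (0, 0)
--     if "Mr." in sentence or "Mrs." in sentence or "Ms." in sentence or "St." in sentence:
--         return (0, 0)
--
--     num_punct = 0
--     num_spaces = 0
--     prev_c_punct = True
--     for c in sentence:
--         if c in allowed_punctuation:
--             if prev_c_punct:
--                 return (0, 0)
--             num_punct += 1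
--             prev_c_punct = True
--             if c == '-':
--                 num_spaces += 1
--         elif c == ' ':
--             num_spaces += 1
--             prev_c_punct = False
--         elif not c.isalpha():
--             return (0, 0)
--         else:
--             prev_c_punct = False
--
--     return (num_spaces + 1, num_punct)
-- ===== SOURCE B (Python) =====
-- allowed_punctuation = {',', '.', '?', '!', ';', ':'}
--
-- def check_setence(sentence):
--     if len(sentence) < 20:
--         return (0, 0)
--     if sentence[0].islower():
--         return (0, 0)
--     if "Mr." in sentence or "Mrs." in sentence or "Ms." in sentence or "St." in sentence:
--         return (0, 0)
--     # pass 1: every character must be a letter, a space, or allowed punctuation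
--     if any(not (c.isalpha() or c == ' ' or c in allowed_punctuation) for c in sentence):
--         return (0, 0)
--     # pass 2: punctuation may not start the sentence nor follow punctuation
--     if sentence[0] in allowed_punctuation or any(
--             a in allowed_punctuation and b in allowed_punctuation
--             for a, b in zip(sentence, sentence[1:])):
--         return (0, 0)
--     # pass 3: count
--     num_spaces = sum(c == ' ' for c in sentence)
--     num_punct = sum(c in allowed_punctuation for c in sentence)
--     return (num_spaces + 1, num_punct)
-- ===== Notes on version B (the rewrite author's own statement) =====
-- stated objective: simpler
-- what changed: Replaces A's single stateful early-return loop (tracking prev_c_punct and two running counters) by three independent passes: a character-class check, a punctuation-adjacency check via zip with the shifted string, then two plain counts.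
import Mathlib
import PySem

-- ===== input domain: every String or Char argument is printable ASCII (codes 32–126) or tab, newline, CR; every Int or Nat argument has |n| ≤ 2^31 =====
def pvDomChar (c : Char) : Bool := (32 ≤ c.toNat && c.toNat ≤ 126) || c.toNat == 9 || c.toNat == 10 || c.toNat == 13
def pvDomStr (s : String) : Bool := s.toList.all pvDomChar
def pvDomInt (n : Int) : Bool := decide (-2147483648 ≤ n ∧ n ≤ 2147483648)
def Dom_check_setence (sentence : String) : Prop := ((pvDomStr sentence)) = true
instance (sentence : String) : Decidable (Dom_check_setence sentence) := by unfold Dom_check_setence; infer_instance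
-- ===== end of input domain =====

-- B replaces A's single stateful early-return loop by three independent passes
-- (character-class check, punctuation-adjacency check via zip with the shifted
-- string, then two counts); objective: simpler. Same return value everywhere.

-- ===== PORT A =====
def pvAllowed (c : Char) : Bool :=
  c == ',' || c == '.' || c == '?' || c == '!' || c == ';' || c == ':'

-- the for-loop of A, with early returns; state (num_punct, num_spaces, prev_c_punct)
def pvLoopA : List Char → Int → Int → Bool → Int × Int
  | [], np, ns, _ => (ns + 1, np)
  | c :: rest, np, ns, prev =>
    if pvAllowed c then
      if prev then (0, 0)
      else pvLoopA rest (np + 1) (if c == '-' then ns + 1 else ns) true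
    else if c == ' ' then pvLoopA rest np (ns + 1) false
    else if !(PySem.Chars.isalpha c) then (0, 0)
    else pvLoopA rest np ns false

def check_setence (sentence : String) : Int × Int :=
  if PySem.Str.len sentence < 20 then (0, 0)
  else if (PySem.Str.pyGet? sentence 0).elim false PySem.Chars.islower then (0, 0)
  else if PySem.Str.isIn "Mr." sentence || PySem.Str.isIn "Mrs." sentence
       || PySem.Str.isIn "Ms." sentence || PySem.Str.isIn "St." sentence then (0, 0)
  else pvLoopA sentence.toList 0 0 true

-- ===== PORT B =====
def check_setence_alt (sentence : String) : Int × Int :=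
  if PySem.Str.len sentence < 20 then (0, 0)
  else if (PySem.Str.pyGet? sentence 0).elim false PySem.Chars.islower then (0, 0)
  else if PySem.Str.isIn "Mr." sentence || PySem.Str.isIn "Mrs." sentence
       || PySem.Str.isIn "Ms." sentence || PySem.Str.isIn "St." sentence then (0, 0)
  else
    let cs := sentence.toList
    if cs.any (fun c => !(PySem.Chars.isalpha c || c == ' ' || pvAllowed c)) then (0, 0)
    else if (PySem.Str.pyGet? sentence 0).elim false pvAllowed
         || ((cs.zip cs.tail).any fun p => pvAllowed p.1 && pvAllowed p.2) then (0, 0)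
    else ((cs.countP (· == ' ') : Int) + 1, (cs.countP pvAllowed : Int))

-- ===== PRECONDITION & SPEC =====
def Spec_check_setence (sentence : String) (out : Int × Int) : Prop := out = check_setence_alt sentence
instance (sentence : String) (out : Int × Int) : Decidable (Spec_check_setence sentence out) := by unfold Spec_check_setence; infer_instance

-- ===== CLAIM (what is proved, stated in full; the proofs are below) =====
def Claim_equal_check_setence : Prop := ∀ (sentence : String), Dom_check_setence sentence → Spec_check_setence sentence (check_setence sentence)

-- ===== LEMMAS AND PROOFS =====

def pvBad (c : Char) : Bool := !(PySem.Chars.isalpha c || c == ' ' || pvAllowed c)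

def pvAdj : Bool → List Char → Bool
  | _, [] => false
  | prev, c :: r => (prev && pvAllowed c) || pvAdj (pvAllowed c) r

theorem allowed_ne_space {c : Char} (h : pvAllowed c = true) : (c == ' ') = false := by
  simp only [pvAllowed, Bool.or_eq_true, beq_iff_eq] at h
  rcases h with ((((h|h)|h)|h)|h)|h <;> subst h <;> decide

theorem allowed_ne_dash {c : Char} (h : pvAllowed c = true) : (c == '-') = false := by
  simp only [pvAllowed, Bool.or_eq_true, beq_iff_eq] at h
  rcases h with ((((h|h)|h)|h)|h)|h <;> subst h <;> decide

theorem loopA_eq : ∀ (cs : List Char) (np ns : Int) (prev : Bool),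
    pvLoopA cs np ns prev =
      if cs.any pvBad then (0, 0)
      else if pvAdj prev cs then (0, 0)
      else (ns + (cs.countP (· == ' ') : Int) + 1, np + (cs.countP pvAllowed : Int))
  | [], np, ns, prev => by simp [pvLoopA, pvAdj]
  | c :: r, np, ns, prev => by
    by_cases hA : pvAllowed c = true
    · have hsp := allowed_ne_space hA
      have hdash := allowed_ne_dash hA
      by_cases hp : prev
      · subst hp
        simp [pvLoopA, hA, pvAdj, pvBad, hsp]
      · simp only [Bool.not_eq_true] at hp; subst hp
        rw [pvLoopA, if_pos hA, if_neg (by simp), hdash, if_neg (by simp), loopA_eq]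
        simp only [List.any_cons, pvBad, hA, Bool.or_true, Bool.not_true,
          Bool.false_or, pvAdj, Bool.false_and, List.countP_cons, hsp]
        split_ifs <;> simp_all [Prod.ext_iff] <;> omega
    · simp only [Bool.not_eq_true] at hA
      by_cases hsp : (c == ' ') = true
      · have hc : c = ' ' := by simpa using hsp
        subst hc
        rw [pvLoopA, if_neg (by simp [hA]), if_pos (by decide), loopA_eq]
        have hbs : pvBad ' ' = false := by decide
        simp only [List.any_cons, hbs, List.countP_cons, pvAdj, hA, Bool.and_false,
          Bool.false_or]
        split_ifs <;> simp_all [Prod.ext_iff] <;> omega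
      · simp only [Bool.not_eq_true] at hsp
        by_cases hal : PySem.Chars.isalpha c = true
        · rw [pvLoopA, if_neg (by simp [hA]), if_neg (by simp [hsp]),
            if_neg (by simp [hal]), loopA_eq]
          simp only [List.any_cons, pvBad, hA, hsp, hal, List.countP_cons, pvAdj,
            Bool.and_false, Bool.false_or, Bool.or_false, Bool.not_true]
          split_ifs <;> simp_all [Prod.ext_iff] <;> omega
        · simp only [Bool.not_eq_true] at hal
          rw [pvLoopA, if_neg (by simp [hA]), if_neg (by simp [hsp]),
            if_pos (by simp [hal])]
          simp [List.any_cons, pvBad, hA, hsp, hal]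

theorem adj_zip : ∀ (r : List Char) (c : Char),
    pvAdj (pvAllowed c) r = (((c :: r).zip r).any fun p => pvAllowed p.1 && pvAllowed p.2)
  | [], c => by simp [pvAdj]
  | d :: r', c => by
    rw [pvAdj, adj_zip r' d]
    simp [Bool.and_comm]

-- ===== VERDICT (by name: the statement is the Claim_ definition above) =====
theorem check_setence_spec : Claim_equal_check_setence := by
  intro sentence _
  show check_setence sentence = check_setence_alt sentence
  unfold check_setence check_setence_alt
  split_ifs with h1 h2 h3
  · rfl
  · rfl
  · rfl
  · -- main case: len ≥ 20, so the list is nonempty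
    have hne : sentence.toList ≠ [] := by
      intro hnil
      rw [PySem.Str.len] at h1
      simp [hnil] at h1
    obtain ⟨c, r, hcs⟩ := List.exists_cons_of_ne_nil hne
    rw [hcs, loopA_eq]
    have hget : PySem.Str.pyGet? sentence 0 = some c := by
      rw [PySem.Str.pyGet?, hcs]
      exact PySem.List.pyGet?_zero_cons c r
    have hbad : (fun c => !(PySem.Chars.isalpha c || c == ' ' || pvAllowed c)) = pvBad := rfl
    simp only [hget, Option.elim, hbad, List.tail_cons, pvAdj, Bool.true_and,
      adj_zip, zero_add]
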